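-- pv_equiv track=rewrite | github.com/qawesrdtfy/CAT | BuildCAS/utils.py | deepUntil
-- ===== SOURCE A (Python) =====
-- def withroot_longest_continue(info, idxs, root):
--     """
--         得到root在的最长的idxs连续序列
--     """
--     rooti = idxs.index(root)
--     right_end = rooti
--     while right_end < len(idxs):
--         if right_end-rooti != idxs[right_end]-root:
--             break
--         right_end += 1
--     left_end = rooti
--     while left_end >= 0:
--         if left_end-rooti != idxs[left_end]-root:
--             break
--         left_end -= 1
--     left_end += 1
--     idxs = idxs[left_end:right_end]
--     return idxs
--
-- def deepUntil(info, start_i, bad_relations, cont=False):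
--     rets = []
--     stack = [start_i]
--     while len(stack) > 0:
--         node_i = stack.pop()
--         rets.append(node_i)
--         for relation, children in info['dp_children'][node_i].items():
--             if relation not in bad_relations:
--                 stack += children
--     rets.sort()
--     if cont:
--         rets = withroot_longest_continue(info, rets, start_i)
--     return rets
-- ===== SOURCE B (Python) =====
-- # B: recursive depth-first visit (left-to-right) instead of A's explicit pop-from-end stack loop;
-- # same visit multiset (no visited set), same sort and the same contiguous-run trim helper.
-- def withroot_longest_continue(info, idxs, root):
--     rooti = idxs.index(root)
--     right_end = rooti
--     while right_end < len(idxs):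
--         if right_end-rooti != idxs[right_end]-root:
--             break
--         right_end += 1
--     left_end = rooti
--     while left_end >= 0:
--         if left_end-rooti != idxs[left_end]-root:
--             break
--         left_end -= 1
--     left_end += 1
--     idxs = idxs[left_end:right_end]
--     return idxs
--
-- def deepUntil(info, start_i, bad_relations, cont=False):
--     children_of = info['dp_children']
--     rets = []
--     def visit(node_i):
--         rets.append(node_i)
--         for relation, kids in children_of[node_i].items():
--             if relation not in bad_relations:
--                 for kid in kids:
--                     visit(kid)
--     visit(start_i)
--     rets.sort()
--     if cont:
--         rets = withroot_longest_continue(info, rets, start_i)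
--     return rets
-- ===== Notes on version B (the rewrite author's own statement) =====
-- stated objective: alternative
-- what changed: A's explicit pop-from-the-end stack loop is replaced by a recursive visit helper that appends the node and recurses into the good-relation children left-to-right (no visited set, so multiplicities match); the sort and the contiguous-run trim helper are unchanged.
import Mathlib
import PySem

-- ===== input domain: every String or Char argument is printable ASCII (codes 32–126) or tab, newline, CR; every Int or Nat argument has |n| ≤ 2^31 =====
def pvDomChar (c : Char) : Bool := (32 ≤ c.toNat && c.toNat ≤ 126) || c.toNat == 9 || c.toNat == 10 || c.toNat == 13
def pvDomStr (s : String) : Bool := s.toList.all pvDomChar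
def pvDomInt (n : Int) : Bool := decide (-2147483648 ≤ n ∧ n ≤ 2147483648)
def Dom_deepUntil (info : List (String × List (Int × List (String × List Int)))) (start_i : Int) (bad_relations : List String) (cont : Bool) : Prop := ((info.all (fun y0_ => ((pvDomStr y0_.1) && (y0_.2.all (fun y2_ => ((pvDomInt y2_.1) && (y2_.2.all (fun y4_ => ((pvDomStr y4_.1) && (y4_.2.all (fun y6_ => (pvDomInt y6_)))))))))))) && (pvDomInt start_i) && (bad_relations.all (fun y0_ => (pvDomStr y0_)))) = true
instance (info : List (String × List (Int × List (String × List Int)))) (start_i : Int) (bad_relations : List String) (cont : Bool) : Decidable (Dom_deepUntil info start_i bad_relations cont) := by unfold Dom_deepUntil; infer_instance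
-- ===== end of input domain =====

-- B replaces A's explicit pop-from-end stack loop by a recursive left-to-right visit (same visit
-- multiset, so the sorted result agrees); the sort and the contiguous-run trim helper are unchanged.
-- Both traversal loops carry a fuel counter as a totality guard only; Pre_ restricts to inputs where
-- the Python A terminates without raising (reachable nodes are keys, reachable part acyclic).

-- ===== PORT A =====

-- helper: the two index scans of withroot_longest_continue (fuel = a simple loop bound, totality guard only)
def wlcRight (idxs : List Int) (root : Int) (rooti : Int) : Nat → Int → Int
  | 0, re => re
  | f + 1, re =>
    if re < (idxs.length : Int) then
      (if re - rooti ≠ PySem.List.pyGetD idxs re 0 - root then re else wlcRight idxs root rooti f (re + 1))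
    else re

def wlcLeft (idxs : List Int) (root : Int) (rooti : Int) : Nat → Int → Int
  | 0, le => le
  | f + 1, le =>
    if le ≥ 0 then
      (if le - rooti ≠ PySem.List.pyGetD idxs le 0 - root then le else wlcLeft idxs root rooti f (le - 1))
    else le

-- shared by both ports (the Python helper is used unchanged by B as well)
def withroot_longest_continue (idxs : List Int) (root : Int) : List Int :=
  match PySem.List.index? idxs root with
  | none => []   -- ValueError in Python; unreachable at both call sites (root was appended to idxs)
  | some rooti =>
    let right_end := wlcRight idxs root (rooti : Int) (idxs.length + 1) (rooti : Int)
    let left_end := wlcLeft idxs root (rooti : Int) (idxs.length + 2) (rooti : Int)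
    PySem.List.slice idxs (some (left_end + 1)) (some right_end)

-- fuel for the traversal of either port: an upper bound on the number of visits of the terminating
-- runs (paths in the acyclic case); a totality guard shared by both ports, never part of the result
def travFuel (dpc : List (Int × List (String × List Int))) : Nat :=
  ((dpc.map (fun p => (p.2.map (fun q => q.2.length)).sum)).sum + dpc.length + 2) ^ (dpc.length + 2)

-- A's while-loop; the Python stack is held reversed (head = Python's top), so stack.pop() is the
-- head and 'stack += children' prepends children.reverse; 'none' = fuel ran out / KeyError
def deepUntilLoop (dpc : List (Int × List (String × List Int))) (bad_relations : List String) :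
    Nat → List Int → List Int → Option (List Int)
  | _, [], rets => some rets
  | 0, _ :: _, _ => none
  | f + 1, node_i :: rest, rets =>
    match (PySem.Dict.mk dpc).get? node_i with
    | none => none   -- KeyError
    | some adjl =>
      let pushed := adjl.foldl (fun st p => if p.1 ∈ bad_relations then st else st ++ p.2) []
      deepUntilLoop dpc bad_relations f (pushed.reverse ++ rest) (rets ++ [node_i])

def deepUntil (info : List (String × List (Int × List (String × List Int)))) (start_i : Int) (bad_relations : List String) (cont : Bool) : List Int :=
  match (PySem.Dict.mk info).get? "dp_children" with
  | none => []   -- KeyError, excluded by Pre_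
  | some dpc =>
    match deepUntilLoop dpc bad_relations (travFuel dpc) [start_i] [] with
    | none => []   -- KeyError / non-termination, excluded by Pre_
    | some rets =>
      let rets := PySem.List.sorted rets (fun x => x) false
      if cont then withroot_longest_continue rets start_i else rets

-- ===== PORT B =====

-- B's recursive visit; fuel (one unit per visit, threaded through: a successful call returning m
-- consumed exactly m.length units) is a totality guard only
mutual
def visitB (dpc : List (Int × List (String × List Int))) (bad_relations : List String) :
    Nat → Int → Option (List Int)
  | 0, _ => none
  | f + 1, node_i =>
    match (PySem.Dict.mk dpc).get? node_i with
    | none => none   -- KeyError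
    | some adjl => (itemsB dpc bad_relations f adjl).map (fun m => node_i :: m)
  termination_by f _ => ((f : Nat), 0)
  decreasing_by exact Prod.Lex.left _ _ (Nat.lt_succ_self f)

def itemsB (dpc : List (Int × List (String × List Int))) (bad_relations : List String) :
    Nat → List (String × List Int) → Option (List Int)
  | _, [] => some []
  | f, (relation, kids) :: t =>
    if relation ∈ bad_relations then itemsB dpc bad_relations f t
    else
      (kidsB dpc bad_relations f kids).bind fun m1 =>
        (itemsB dpc bad_relations (f - m1.length) t).map fun m2 => m1 ++ m2
  termination_by f l => ((f : Nat), sizeOf l)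
  decreasing_by
    · exact Prod.Lex.right _ (by simp; try omega)
    · exact Prod.Lex.right _ (by simp; try omega)
    · rcases Nat.lt_or_ge (f - m1.length) f with h | h
      · exact Prod.Lex.left _ _ h
      · have he : f - m1.length = f := Nat.le_antisymm (Nat.sub_le _ _) h
        rw [he]; exact Prod.Lex.right _ (by simp; try omega)

def kidsB (dpc : List (Int × List (String × List Int))) (bad_relations : List String) :
    Nat → List Int → Option (List Int)
  | _, [] => some []
  | f, kid :: t =>
    (visitB dpc bad_relations f kid).bind fun m1 =>
      (kidsB dpc bad_relations (f - m1.length) t).map fun m2 => m1 ++ m2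
  termination_by f l => ((f : Nat), sizeOf l)
  decreasing_by
    · exact Prod.Lex.right _ (by simp; try omega)
    · rcases Nat.lt_or_ge (f - m1.length) f with h | h
      · exact Prod.Lex.left _ _ h
      · have he : f - m1.length = f := Nat.le_antisymm (Nat.sub_le _ _) h
        rw [he]; exact Prod.Lex.right _ (by simp; try omega)
end

def deepUntil_alt (info : List (String × List (Int × List (String × List Int)))) (start_i : Int) (bad_relations : List String) (cont : Bool) : List Int :=
  match (PySem.Dict.mk info).get? "dp_children" with
  | none => []   -- KeyError, excluded by Pre_
  | some dpc =>
    match visitB dpc bad_relations (travFuel dpc) start_i with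
    | none => []   -- KeyError / non-termination, excluded by Pre_
    | some rets =>
      let rets := PySem.List.sorted rets (fun x => x) false
      if cont then withroot_longest_continue rets start_i else rets

-- ===== PRECONDITION & SPEC =====

-- good-relation children of a node (empty if the node has no entry)
def kidsOf (dpc : List (Int × List (String × List Int))) (bad_relations : List String) (i : Int) : List Int :=
  match (PySem.Dict.mk dpc).get? i with
  | none => []
  | some adjl => adjl.flatMap fun p => if p.1 ∈ bad_relations then [] else p.2

-- one expansion step of the reachable set, and its closure (enough iterations to stabilise)
def stepSet (dpc : List (Int × List (String × List Int))) (bad_relations : List String) (S : List Int) : List Int :=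
  PySem.Set.ofList (S ++ S.flatMap (kidsOf dpc bad_relations))

def reachFrom (dpc : List (Int × List (String × List Int))) (bad_relations : List String) (S : List Int) : List Int :=
  (stepSet dpc bad_relations)^[dpc.length + 2] S

-- Pre_: exactly the inputs on which the Python A returns normally — 'dp_children' is a key of info,
-- every node reachable from start_i over non-bad relations has an entry (no KeyError), and no
-- reachable node can reach itself in ≥ 1 step (otherwise A's while-loop never terminates).
-- The Nodup clauses only rule out duplicate dict keys, which a Python dict argument cannot have.
def Pre_deepUntil (info : List (String × List (Int × List (String × List Int)))) (start_i : Int) (bad_relations : List String) (cont : Bool) : Prop :=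
  (info.map Prod.fst).Nodup ∧
  ((PySem.Dict.mk info).get? "dp_children").isSome = true ∧
  (let dpc := ((PySem.Dict.mk info).get? "dp_children").getD [];
   (dpc.map Prod.fst).Nodup ∧
   (∀ p ∈ dpc, (p.2.map Prod.fst).Nodup) ∧
   (∀ i ∈ reachFrom dpc bad_relations [start_i], ((PySem.Dict.mk dpc).get? i).isSome = true) ∧
   (∀ i ∈ reachFrom dpc bad_relations [start_i], i ∉ reachFrom dpc bad_relations (kidsOf dpc bad_relations i)))

instance (info : List (String × List (Int × List (String × List Int)))) (start_i : Int) (bad_relations : List String) (cont : Bool) : Decidable (Pre_deepUntil info start_i bad_relations cont) := by unfold Pre_deepUntil; infer_instance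

def pvWitness_deepUntil : (List (String × List (Int × List (String × List Int)))) × Int × List String × Bool :=
  ([("dp_children", [(0, [("r", [1, 2]), ("s", [2])]), (1, [("r", [2])]), (2, [])])], 0, ["s"], true)

def Spec_deepUntil (info : List (String × List (Int × List (String × List Int)))) (start_i : Int) (bad_relations : List String) (cont : Bool) (out : List Int) : Prop := out = deepUntil_alt info start_i bad_relations cont
instance (info : List (String × List (Int × List (String × List Int)))) (start_i : Int) (bad_relations : List String) (cont : Bool) (out : List Int) : Decidable (Spec_deepUntil info start_i bad_relations cont out) := by unfold Spec_deepUntil; infer_instance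

-- ===== CLAIM (what is proved, stated in full; the proofs are below) =====
def Claim_equal_deepUntil : Prop := ∀ (info : List (String × List (Int × List (String × List Int)))) (start_i : Int) (bad_relations : List String) (cont : Bool), Dom_deepUntil info start_i bad_relations cont → Pre_deepUntil info start_i bad_relations cont → Spec_deepUntil info start_i bad_relations cont (deepUntil info start_i bad_relations cont)

-- ===== LEMMAS AND PROOFS =====

-- proof-side mirror of A's traversal: visit a node, then its good children flattened and reversed,
-- sequentially with the same one-unit-per-visit fuel accounting
def goodRev (bad_relations : List String) (adjl : List (String × List Int)) : List Int :=
  (adjl.foldl (fun st p => if p.1 ∈ bad_relations then st else st ++ p.2) []).reverse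

mutual
def visitR (dpc : List (Int × List (String × List Int))) (bad_relations : List String) :
    Nat → Int → Option (List Int)
  | 0, _ => none
  | f + 1, node_i =>
    match (PySem.Dict.mk dpc).get? node_i with
    | none => none
    | some adjl => (seqR dpc bad_relations f (goodRev bad_relations adjl)).map (fun m => node_i :: m)
  termination_by f _ => ((f : Nat), 0)
  decreasing_by exact Prod.Lex.left _ _ (Nat.lt_succ_self f)

def seqR (dpc : List (Int × List (String × List Int))) (bad_relations : List String) :
    Nat → List Int → Option (List Int)
  | _, [] => some []
  | f, c :: t =>
    (visitR dpc bad_relations f c).bind fun m1 =>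
      (seqR dpc bad_relations (f - m1.length) t).map fun m2 => m1 ++ m2
  termination_by f l => ((f : Nat), sizeOf l)
  decreasing_by
    · exact Prod.Lex.right _ (by simp; try omega)
    · rcases Nat.lt_or_ge (f - m1.length) f with h | h
      · exact Prod.Lex.left _ _ h
      · have he : f - m1.length = f := Nat.le_antisymm (Nat.sub_le _ _) h
        rw [he]; exact Prod.Lex.right _ (by simp; try omega)
end

-- basic equations / shapes ---------------------------------------------------

theorem seqR_nil (dpc : List (Int × List (String × List Int))) (bad : List String) (f : Nat) :
    seqR dpc bad f [] = some [] := by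
  rw [seqR]

theorem seqR_cons (dpc : List (Int × List (String × List Int))) (bad : List String) (f : Nat) (c : Int) (t : List Int) :
    seqR dpc bad f (c :: t) =
      (visitR dpc bad f c).bind fun m1 => (seqR dpc bad (f - m1.length) t).map fun m2 => m1 ++ m2 := by
  rw [seqR]

theorem visitR_zero (dpc : List (Int × List (String × List Int))) (bad : List String) (i : Int) :
    visitR dpc bad 0 i = none := by
  rw [visitR]

theorem visitR_succ (dpc : List (Int × List (String × List Int))) (bad : List String) (f : Nat) (i : Int) :
    visitR dpc bad (f + 1) i =
      match (PySem.Dict.mk dpc).get? i with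
      | none => none
      | some adjl => (seqR dpc bad f (goodRev bad adjl)).map (fun m => i :: m) := by
  rw [visitR]

theorem visitR_shape (dpc : List (Int × List (String × List Int))) (bad : List String) (f : Nat) (i : Int)
    (m : List Int) (h : visitR dpc bad f i = some m) : ∃ t, m = i :: t := by
  match f with
  | 0 => rw [visitR_zero] at h; cases h
  | f + 1 =>
    rw [visitR_succ] at h
    cases hg : (PySem.Dict.mk dpc).get? i with
    | none => rw [hg] at h; cases h
    | some adjl =>
      rw [hg] at h
      simp only [Option.map_eq_some_iff] at h
      obtain ⟨m1, _, hm⟩ := h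
      exact ⟨m1, hm.symm⟩

-- determinacy: a successful traversal consumed exactly m.length fuel; it succeeds with the same
-- result at every fuel ≥ m.length (and, by uniqueness, at no smaller fuel)
theorem detR (dpc : List (Int × List (String × List Int))) (bad : List String) : ∀ f : Nat,
    (∀ i m, visitR dpc bad f i = some m →
      m.length ≤ f ∧ ∀ g, m.length ≤ g → visitR dpc bad g i = some m) ∧
    (∀ l m, seqR dpc bad f l = some m →
      m.length ≤ f ∧ ∀ g, m.length ≤ g → seqR dpc bad g l = some m) := by
  intro f
  induction f using Nat.strong_induction_on with
  | _ f IH =>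
    have hv : ∀ i m, visitR dpc bad f i = some m →
        m.length ≤ f ∧ ∀ g, m.length ≤ g → visitR dpc bad g i = some m := by
      intro i m h
      match f, IH with
      | 0, _ => rw [visitR_zero] at h; cases h
      | f + 1, IH =>
        rw [visitR_succ] at h
        cases hg : (PySem.Dict.mk dpc).get? i with
        | none => rw [hg] at h; cases h
        | some adjl =>
          rw [hg] at h
          simp only [Option.map_eq_some_iff] at h
          obtain ⟨m1, hs, hm⟩ := h
          subst hm
          obtain ⟨hle, hup⟩ := (IH f (Nat.lt_succ_self f)).2 _ _ hs
          refine ⟨by simpa using Nat.succ_le_succ hle, ?_⟩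
          intro g hg2
          simp only [List.length_cons] at hg2
          match g, hg2 with
          | g + 1, hg2 =>
            rw [visitR_succ, hg]
            simp [hup g (by omega)]
    refine ⟨hv, ?_⟩
    intro l
    induction l with
    | nil =>
      intro m h
      rw [seqR_nil] at h
      simp only [Option.some_inj] at h
      subst h
      exact ⟨by simp, fun g _ => seqR_nil dpc bad g⟩
    | cons c t IHt =>
      intro m h
      rw [seqR_cons] at h
      cases h1 : visitR dpc bad f c with
      | none => rw [h1] at h; cases h
      | some m1 =>
        rw [h1] at h
        simp only [Option.bind_some, Option.map_eq_some_iff] at h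
        obtain ⟨m2, h2, hm⟩ := h
        subst hm
        obtain ⟨hle1, hup1⟩ := hv _ _ h1
        obtain ⟨c1, hsh⟩ := visitR_shape dpc bad f c m1 h1
        have hm1pos : 0 < m1.length := by subst hsh; simp
        obtain ⟨hle2, hup2⟩ := (IH (f - m1.length) (by omega)).2 _ _ h2
        refine ⟨by simp; omega, ?_⟩
        intro g hg2
        simp only [List.length_append] at hg2
        rw [seqR_cons, hup1 g (by omega)]
        simp only [Option.bind_some]
        rw [hup2 (g - m1.length) (by omega)]
        rfl

theorem visitR_le (dpc : List (Int × List (String × List Int))) (bad : List String) {f : Nat} {i : Int}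
    {m : List Int} (h : visitR dpc bad f i = some m) : m.length ≤ f := ((detR dpc bad f).1 _ _ h).1

theorem visitR_up (dpc : List (Int × List (String × List Int))) (bad : List String) {f : Nat} {i : Int}
    {m : List Int} (h : visitR dpc bad f i = some m) {g : Nat} (hg : m.length ≤ g) :
    visitR dpc bad g i = some m := ((detR dpc bad f).1 _ _ h).2 g hg

theorem seqR_le (dpc : List (Int × List (String × List Int))) (bad : List String) {f : Nat} {l : List Int}
    {m : List Int} (h : seqR dpc bad f l = some m) : m.length ≤ f := ((detR dpc bad f).2 _ _ h).1

theorem seqR_up (dpc : List (Int × List (String × List Int))) (bad : List String) {f : Nat} {l : List Int}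
    {m : List Int} (h : seqR dpc bad f l = some m) {g : Nat} (hg : m.length ≤ g) :
    seqR dpc bad g l = some m := ((detR dpc bad f).2 _ _ h).2 g hg

theorem seqR_append (dpc : List (Int × List (String × List Int))) (bad : List String) :
    ∀ (u v : List Int) (f : Nat),
      seqR dpc bad f (u ++ v) =
        (seqR dpc bad f u).bind fun m1 => (seqR dpc bad (f - m1.length) v).map fun m2 => m1 ++ m2 := by
  intro u
  induction u with
  | nil => intro v f; simp [seqR_nil]
  | cons c t IHt =>
    intro v f
    rw [List.cons_append, seqR_cons, seqR_cons]
    cases h1 : visitR dpc bad f c with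
    | none => rfl
    | some m1 =>
      simp only [Option.bind_some, IHt v (f - m1.length)]
      cases h2 : seqR dpc bad (f - m1.length) t with
      | none => rfl
      | some m2 =>
        simp only [Option.bind_some]
        cases h3 : seqR dpc bad (f - m1.length - m2.length) v <;>
          simp [← Nat.sub_sub, h3, List.append_assoc]

theorem seqR_singleton (dpc : List (Int × List (String × List Int))) (bad : List String) (f : Nat) (c : Int) :
    seqR dpc bad f [c] = visitR dpc bad f c := by
  rw [seqR_cons]
  cases h : visitR dpc bad f c with
  | none => rfl
  | some m1 => simp [seqR_nil]

theorem goodRev_foldl (bad : List String) :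
    ∀ (l : List (String × List Int)) (acc : List Int),
      l.foldl (fun st p => if p.1 ∈ bad then st else st ++ p.2) acc =
        acc ++ l.flatMap fun p => if p.1 ∈ bad then [] else p.2 := by
  intro l
  induction l with
  | nil => simp
  | cons p t IHt =>
    intro acc
    rw [List.foldl_cons, List.flatMap_cons, IHt]
    by_cases h : p.1 ∈ bad <;> simp [h]

theorem goodRev_cons (bad : List String) (p : String × List Int) (t : List (String × List Int)) :
    goodRev bad (p :: t) = goodRev bad t ++ (if p.1 ∈ bad then [] else p.2.reverse) := by
  unfold goodRev
  rw [goodRev_foldl, goodRev_foldl, List.flatMap_cons]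
  by_cases h : p.1 ∈ bad <;> simp [h]

-- A's stack loop is exactly the sequential reverse-order traversal
theorem loop_eq_seqR (dpc : List (Int × List (String × List Int))) (bad : List String) :
    ∀ (f : Nat) (st rets : List Int),
      deepUntilLoop dpc bad f st rets = (seqR dpc bad f st).map fun m => rets ++ m := by
  intro f
  induction f with
  | zero =>
    intro st rets
    cases st with
    | nil => simp [deepUntilLoop, seqR_nil]
    | cons c t => simp [deepUntilLoop, seqR_cons, visitR_zero]
  | succ f IHf =>
    intro st rets
    cases st with
    | nil => simp [deepUntilLoop, seqR_nil]
    | cons node rest =>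
      rw [deepUntilLoop]
      cases hg : (PySem.Dict.mk dpc).get? node with
      | none =>
        simp only [hg, seqR_cons, visitR_succ]
        rfl
      | some adjl =>
        simp only []
        rw [IHf]
        have hpush : (adjl.foldl (fun st p => if p.1 ∈ bad then st else st ++ p.2) []).reverse
            = goodRev bad adjl := rfl
        rw [hpush, seqR_append, seqR_cons, visitR_succ, hg]
        cases h1 : seqR dpc bad f (goodRev bad adjl) with
        | none => simp [h1]
        | some m1 =>
          have harith : f + 1 - (m1.length + 1) = f - m1.length := by omega
          cases h2 : seqR dpc bad (f - m1.length) rest with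
          | none => simp [h1, h2, harith]
          | some m2 => simp [h1, h2, harith]

theorem visitR_unique (dpc : List (Int × List (String × List Int))) (bad : List String) {f g : Nat}
    {i : Int} {m m' : List Int} (h1 : visitR dpc bad f i = some m) (h2 : visitR dpc bad g i = some m') :
    m = m' := by
  have e1 := visitR_up dpc bad h1 (g := f + g) (le_trans (visitR_le dpc bad h1) (Nat.le_add_right f g))
  have e2 := visitR_up dpc bad h2 (g := f + g) (le_trans (visitR_le dpc bad h2) (Nat.le_add_left g f))
  rw [e1] at e2; exact Option.some_inj.mp e2

theorem seqR_unique (dpc : List (Int × List (String × List Int))) (bad : List String) {f g : Nat}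
    {l : List Int} {m m' : List Int} (h1 : seqR dpc bad f l = some m) (h2 : seqR dpc bad g l = some m') :
    m = m' := by
  have e1 := seqR_up dpc bad h1 (g := f + g) (le_trans (seqR_le dpc bad h1) (Nat.le_add_right f g))
  have e2 := seqR_up dpc bad h2 (g := f + g) (le_trans (seqR_le dpc bad h2) (Nat.le_add_left g f))
  rw [e1] at e2; exact Option.some_inj.mp e2

-- B-side equations
theorem visitB_zero (dpc : List (Int × List (String × List Int))) (bad : List String) (i : Int) :
    visitB dpc bad 0 i = none := by rw [visitB]

theorem visitB_succ (dpc : List (Int × List (String × List Int))) (bad : List String) (f : Nat) (i : Int) :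
    visitB dpc bad (f + 1) i =
      match (PySem.Dict.mk dpc).get? i with
      | none => none
      | some adjl => (itemsB dpc bad f adjl).map (fun m => i :: m) := by rw [visitB]

theorem itemsB_nil (dpc : List (Int × List (String × List Int))) (bad : List String) (f : Nat) :
    itemsB dpc bad f [] = some [] := by rw [itemsB]

theorem itemsB_cons (dpc : List (Int × List (String × List Int))) (bad : List String) (f : Nat)
    (relation : String) (kids : List Int) (t : List (String × List Int)) :
    itemsB dpc bad f ((relation, kids) :: t) =
      if relation ∈ bad then itemsB dpc bad f t
      else (kidsB dpc bad f kids).bind fun m1 => (itemsB dpc bad (f - m1.length) t).map fun m2 => m1 ++ m2 := by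
  rw [itemsB]

theorem kidsB_nil (dpc : List (Int × List (String × List Int))) (bad : List String) (f : Nat) :
    kidsB dpc bad f [] = some [] := by rw [kidsB]

theorem kidsB_cons (dpc : List (Int × List (String × List Int))) (bad : List String) (f : Nat)
    (kid : Int) (t : List Int) :
    kidsB dpc bad f (kid :: t) =
      (visitB dpc bad f kid).bind fun m1 => (kidsB dpc bad (f - m1.length) t).map fun m2 => m1 ++ m2 := by
  rw [kidsB]

-- the relation between B's and the reverse-order traversal: same failures, permuted successes
def PRel (x y : Option (List Int)) : Prop :=
  (x = none ∧ y = none) ∨ ∃ a b, x = some a ∧ y = some b ∧ a.Perm b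

theorem relBR (dpc : List (Int × List (String × List Int))) (bad : List String) : ∀ f : Nat,
    (∀ i, PRel (visitB dpc bad f i) (visitR dpc bad f i)) ∧
    (∀ l, PRel (kidsB dpc bad f l) (seqR dpc bad f l.reverse)) ∧
    (∀ l, PRel (itemsB dpc bad f l) (seqR dpc bad f (goodRev bad l))) := by
  intro f
  induction f using Nat.strong_induction_on with
  | _ f IH =>
    have hv : ∀ i, PRel (visitB dpc bad f i) (visitR dpc bad f i) := by
      intro i
      match f, IH with
      | 0, _ => exact Or.inl ⟨visitB_zero dpc bad i, visitR_zero dpc bad i⟩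
      | f + 1, IH =>
        rw [visitB_succ, visitR_succ]
        cases hg : (PySem.Dict.mk dpc).get? i with
        | none => exact Or.inl ⟨rfl, rfl⟩
        | some adjl =>
          rcases (IH f (Nat.lt_succ_self f)).2.2 adjl with ⟨h1, h2⟩ | ⟨a, b, h1, h2, hp⟩
          · exact Or.inl ⟨by simp [h1], by simp [h2]⟩
          · exact Or.inr ⟨i :: a, i :: b, by simp [h1], by simp [h2], hp.cons i⟩
    have hk : ∀ l, PRel (kidsB dpc bad f l) (seqR dpc bad f l.reverse) := by
      intro l
      induction l with
      | nil => exact Or.inr ⟨[], [], kidsB_nil dpc bad f, seqR_nil dpc bad f, List.Perm.refl []⟩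
      | cons c t IHt =>
        rw [kidsB_cons, List.reverse_cons, seqR_append dpc bad]
        rcases hv c with ⟨h1, h1'⟩ | ⟨m1, m1', h1, h1', hp1⟩
        · -- visit of c fails on both sides
          simp only [h1, Option.bind_none]
          cases hM : seqR dpc bad f t.reverse with
          | none => exact Or.inl ⟨rfl, rfl⟩
          | some M =>
            cases hq : visitR dpc bad (f - M.length) c with
            | none => exact Or.inl ⟨rfl, by simp [seqR_singleton, hq]⟩
            | some q =>
              exfalso
              have := visitR_up dpc bad hq (g := f)
                (le_trans (visitR_le dpc bad hq) (Nat.sub_le f M.length))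
              rw [h1'] at this; cases this
        · -- visit of c succeeds on both sides with permuted results
          obtain ⟨c1, hsh⟩ := visitR_shape dpc bad f c m1' h1'
          have hlen : m1.length = m1'.length := hp1.length_eq
          have hpos : 0 < m1.length := by rw [hlen, hsh]; simp
          have hle1 : m1.length ≤ f := by rw [hlen]; exact visitR_le dpc bad h1'
          simp only [h1, Option.bind_some]
          rcases (IH (f - m1.length) (by omega)).2.1 t with ⟨h2, h2'⟩ | ⟨m2, m2', h2, h2', hp2⟩
          · -- the rest fails at the reduced fuel on both sides
            rw [h2]
            cases hM : seqR dpc bad f t.reverse with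
            | none => exact Or.inl ⟨rfl, rfl⟩
            | some M =>
              have hMgt : f - m1.length < M.length := by
                by_contra hcon
                push Not at hcon
                rw [seqR_up dpc bad hM hcon] at h2'; cases h2'
              cases hq : visitR dpc bad (f - M.length) c with
              | none => exact Or.inl ⟨rfl, by simp [seqR_singleton, hq]⟩
              | some q =>
                exfalso
                have hqf := visitR_up dpc bad hq (g := f)
                  (le_trans (visitR_le dpc bad hq) (Nat.sub_le f M.length))
                have hqm := visitR_unique dpc bad hqf h1'
                subst hqm
                have := visitR_le dpc bad hq
                have := seqR_le dpc bad hM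
                omega
          · -- both succeed: assemble the permutation
            rw [h2]
            have hlen2 : m2.length = m2'.length := hp2.length_eq
            have hle2 : m2'.length ≤ f - m1.length := seqR_le dpc bad h2'
            have hM : seqR dpc bad f t.reverse = some m2' :=
              seqR_up dpc bad h2' (le_trans hle2 (Nat.sub_le f m1.length))
            rw [hM]
            have hq : visitR dpc bad (f - m2'.length) c = some m1' :=
              visitR_up dpc bad h1' (by rw [← hlen]; omega)
            refine Or.inr ⟨m1 ++ m2, m2' ++ m1', by simp, ?_, ?_⟩
            · simp [seqR_singleton, hq]
            · exact (hp1.append hp2).trans (List.perm_append_comm)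
    refine ⟨hv, hk, ?_⟩
    intro l
    induction l with
    | nil => exact Or.inr ⟨[], [], itemsB_nil dpc bad f, seqR_nil dpc bad f, List.Perm.refl []⟩
    | cons p t IHt =>
      obtain ⟨relation, kids⟩ := p
      rw [itemsB_cons, goodRev_cons]
      by_cases hbad : relation ∈ bad
      · simpa [hbad] using IHt
      · simp only [hbad, ite_false]
        rw [seqR_append dpc bad]
        rcases hk kids with ⟨h1, h1'⟩ | ⟨m1, m1', h1, h1', hp1⟩
        · simp only [h1, Option.bind_none]
          cases hM : seqR dpc bad f (goodRev bad t) with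
          | none => exact Or.inl ⟨rfl, rfl⟩
          | some M =>
            cases hq : seqR dpc bad (f - M.length) kids.reverse with
            | none => exact Or.inl ⟨rfl, by simp [hq]⟩
            | some q =>
              exfalso
              have := seqR_up dpc bad hq (g := f)
                (le_trans (seqR_le dpc bad hq) (Nat.sub_le f M.length))
              rw [h1'] at this; cases this
        · have hlen : m1.length = m1'.length := hp1.length_eq
          have hle1 : m1.length ≤ f := by rw [hlen]; exact seqR_le dpc bad h1'
          simp only [h1, Option.bind_some]
          have hrelt : PRel (itemsB dpc bad (f - m1.length) t)
              (seqR dpc bad (f - m1.length) (goodRev bad t)) := by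
            rcases Nat.eq_zero_or_pos m1.length with hz | hz
            · rw [hz, Nat.sub_zero]; exact IHt
            · exact (IH (f - m1.length) (by omega)).2.2 t
          rcases hrelt with ⟨h2, h2'⟩ | ⟨m2, m2', h2, h2', hp2⟩
          · rw [h2]
            cases hM : seqR dpc bad f (goodRev bad t) with
            | none => exact Or.inl ⟨rfl, rfl⟩
            | some M =>
              have hMgt : f - m1.length < M.length := by
                by_contra hcon
                push Not at hcon
                rw [seqR_up dpc bad hM hcon] at h2'; cases h2'
              cases hq : seqR dpc bad (f - M.length) kids.reverse with
              | none => exact Or.inl ⟨rfl, by simp [hq]⟩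
              | some q =>
                exfalso
                have hqf := seqR_up dpc bad hq (g := f)
                  (le_trans (seqR_le dpc bad hq) (Nat.sub_le f M.length))
                have hqm := seqR_unique dpc bad hqf h1'
                subst hqm
                have := seqR_le dpc bad hq
                have := seqR_le dpc bad hM
                omega
          · rw [h2]
            have hle2 : m2'.length ≤ f - m1.length := seqR_le dpc bad h2'
            have hM : seqR dpc bad f (goodRev bad t) = some m2' :=
              seqR_up dpc bad h2' (le_trans hle2 (Nat.sub_le f m1.length))
            rw [hM]
            have hq : seqR dpc bad (f - m2'.length) kids.reverse = some m1' :=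
              seqR_up dpc bad h1' (by rw [← hlen]; omega)
            refine Or.inr ⟨m1 ++ m2, m2' ++ m1', by simp, by simp [hq], ?_⟩
            exact (hp1.append hp2).trans (List.perm_append_comm)

-- both ports agree on every input: A's loop is the reverse-order traversal (loop_eq_seqR),
-- which fails exactly when B's forward traversal fails and otherwise returns a permutation
-- of it (relBR); sorting makes the two results identical, and the trim helper is shared.
theorem deepUntil_eq_alt (info : List (String × List (Int × List (String × List Int))))
    (start_i : Int) (bad_relations : List String) (cont : Bool) :
    deepUntil info start_i bad_relations cont = deepUntil_alt info start_i bad_relations cont := by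
  unfold deepUntil deepUntil_alt
  cases hg : (PySem.Dict.mk info).get? "dp_children" with
  | none => rfl
  | some dpc =>
    have hA : deepUntilLoop dpc bad_relations (travFuel dpc) [start_i] [] =
        visitR dpc bad_relations (travFuel dpc) start_i := by
      rw [loop_eq_seqR, seqR_singleton]
      cases h : visitR dpc bad_relations (travFuel dpc) start_i <;> simp
    simp only []
    rw [hA]
    rcases (relBR dpc bad_relations (travFuel dpc)).1 start_i with ⟨h1, h2⟩ | ⟨a, b, h1, h2, hp⟩
    · rw [h1, h2]
    · rw [h1, h2]
      have hs : PySem.List.sorted b (fun x => x) false = PySem.List.sorted a (fun x => x) false :=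
        (PySem.List.sorted_id_eq_sorted_id_iff_perm b a).mpr hp.symm
      simp only [hs]

theorem deepUntil_spec : Claim_equal_deepUntil := by
  intro info start_i bad_relations cont _ _
  unfold Spec_deepUntil
  exact deepUntil_eq_alt info start_i bad_relations cont
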